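-- pv_equiv track=rewrite | github.com/rain-droid/orgIO | backend/agents/generative_ui_agent.py | _default_kanban
-- ===== SOURCE A (Python) =====
-- from typing import List, Dict, Any
--
-- def _default_kanban(tasks: List[Dict]) -> Dict:
--     """Default kanban structure"""
--     return {
--         "columns": {
--             "todo": [t.get("id") for t in tasks if t.get("status") == "todo"],
--             "in_progress": [t.get("id") for t in tasks if t.get("status") == "in_progress"],
--             "done": [t.get("id") for t in tasks if t.get("status") == "done"]
--         }
--     }
-- ===== SOURCE B (Python) =====
-- def _default_kanban(tasks):
--     """Default kanban structure (single pass, three accumulators)"""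
--     todo, in_progress, done = [], [], []
--     for t in tasks:
--         status = t.get("status")
--         tid = t.get("id")
--         if status == "todo":
--             todo.append(tid)
--         elif status == "in_progress":
--             in_progress.append(tid)
--         elif status == "done":
--             done.append(tid)
--     return {"columns": {"todo": todo, "in_progress": in_progress, "done": done}}
-- ===== Notes on version B (the rewrite author's own statement) =====
-- stated objective: alternative
-- what changed: One pass over tasks with three accumulator lists and an if/elif chain on the status, instead of three separate filtering comprehensions over the whole list.
import Mathlib
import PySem

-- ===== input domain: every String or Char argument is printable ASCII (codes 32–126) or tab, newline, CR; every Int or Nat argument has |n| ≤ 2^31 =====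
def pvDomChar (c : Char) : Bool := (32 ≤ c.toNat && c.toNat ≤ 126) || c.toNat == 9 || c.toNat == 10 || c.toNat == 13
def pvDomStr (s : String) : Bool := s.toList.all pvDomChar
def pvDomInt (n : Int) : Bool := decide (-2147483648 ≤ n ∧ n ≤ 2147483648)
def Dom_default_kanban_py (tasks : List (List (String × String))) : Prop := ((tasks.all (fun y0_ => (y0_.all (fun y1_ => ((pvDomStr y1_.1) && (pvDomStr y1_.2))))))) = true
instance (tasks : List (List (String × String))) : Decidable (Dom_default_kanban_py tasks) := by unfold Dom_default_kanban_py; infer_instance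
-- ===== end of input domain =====

-- B makes one pass with three accumulator lists and an if/elif chain instead of A's three filtering comprehensions; same result, alternative decomposition.

-- ===== PORT A =====
-- t.get(k) on a Python dict parameter (built with later duplicates overwriting)
def pvGet (t : List (String × String)) (k : String) : Option String :=
  (PySem.Dict.ofList t).get? k

def default_kanban_py (tasks : List (List (String × String))) : List (String × List (String × List (Option String))) :=
  [("columns",
    [("todo", (tasks.filter (fun t => pvGet t "status" == some "todo")).map (fun t => pvGet t "id")),
     ("in_progress", (tasks.filter (fun t => pvGet t "status" == some "in_progress")).map (fun t => pvGet t "id")),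
     ("done", (tasks.filter (fun t => pvGet t "status" == some "done")).map (fun t => pvGet t "id"))])]

-- ===== PORT B =====
def pvStep (acc : List (Option String) × List (Option String) × List (Option String))
    (t : List (String × String)) :
    List (Option String) × List (Option String) × List (Option String) :=
  let s := pvGet t "status"
  let i := pvGet t "id"
  if s == some "todo" then (acc.1 ++ [i], acc.2.1, acc.2.2)
  else if s == some "in_progress" then (acc.1, acc.2.1 ++ [i], acc.2.2)
  else if s == some "done" then (acc.1, acc.2.1, acc.2.2 ++ [i])
  else acc

def default_kanban_py_alt (tasks : List (List (String × String))) : List (String × List (String × List (Option String))) :=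
  let r := tasks.foldl pvStep ([], [], [])
  [("columns", [("todo", r.1), ("in_progress", r.2.1), ("done", r.2.2)])]

-- ===== PRECONDITION & SPEC =====
def Spec_default_kanban_py (tasks : List (List (String × String))) (out : List (String × List (String × List (Option String)))) : Prop := out = default_kanban_py_alt tasks
instance (tasks : List (List (String × String))) (out : List (String × List (String × List (Option String)))) : Decidable (Spec_default_kanban_py tasks out) := by unfold Spec_default_kanban_py; infer_instance

-- ===== CLAIM (what is proved, stated in full; the proofs are below) =====
def Claim_equal_default_kanban_py : Prop := ∀ (tasks : List (List (String × String))), Dom_default_kanban_py tasks → Spec_default_kanban_py tasks (default_kanban_py tasks)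

-- ===== LEMMAS AND PROOFS =====
theorem pvFold_inv (tasks : List (List (String × String)))
    (acc : List (Option String) × List (Option String) × List (Option String)) :
    tasks.foldl pvStep acc =
      (acc.1 ++ (tasks.filter (fun t => pvGet t "status" == some "todo")).map (fun t => pvGet t "id"),
       acc.2.1 ++ (tasks.filter (fun t => pvGet t "status" == some "in_progress")).map (fun t => pvGet t "id"),
       acc.2.2 ++ (tasks.filter (fun t => pvGet t "status" == some "done")).map (fun t => pvGet t "id")) := by
  induction tasks generalizing acc with
  | nil => simp
  | cons t ts ih =>
    simp only [List.foldl_cons, ih, List.filter_cons]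
    unfold pvStep
    by_cases h1 : pvGet t "status" == some "todo"
    · rw [beq_iff_eq] at h1; simp [h1]
    · by_cases h2 : pvGet t "status" == some "in_progress"
      · rw [beq_iff_eq] at h2; simp [h1, h2]
      · by_cases h3 : pvGet t "status" == some "done"
        · simp [h1, h2, h3]
        · simp [h1, h2, h3]

-- ===== VERDICT (by name: the statement is the Claim_ definition above) =====
theorem default_kanban_py_spec : Claim_equal_default_kanban_py := by
  intro tasks _
  unfold Spec_default_kanban_py default_kanban_py default_kanban_py_alt
  rw [pvFold_inv]
  simp
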